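-- pv_equiv track=rewrite | github.com/saikadiravan/placement_preparation | src/etl/extractor.py | _parse_csv
-- ===== SOURCE A (Python) =====
-- def _parse_csv(raw: str) -> list:
--     problems = []
--     for line in raw.splitlines():
--         line = line.strip()
--         if not line or line.lower().startswith(('id', 'title', 'frequency', 'difficulty', 'leetcode')):
--             continue
--         parts = [p.strip().strip('"') for p in line.split(',') if p.strip()]
--         if len(parts) < 2:
--             continue
--         # Title is often the second column
--         title = parts[1] if len(parts) > 1 else parts[0]
--         if title and len(title) > 5 and not title.replace(" ", "").isdigit():
--             problems.append(title)
--     return list(dict.fromkeys(problems))[:100]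
-- ===== SOURCE B (Python) =====
-- def _title_of(line):
--     line = line.strip()
--     if not line or line.lower().startswith(('id', 'title', 'frequency', 'difficulty', 'leetcode')):
--         return None
--     parts = [p.strip().strip('"') for p in line.split(',') if p.strip()]
--     if len(parts) < 2:
--         return None
--     t = parts[1]
--     return t if len(t) > 5 and not t.replace(" ", "").isdigit() else None
--
--
-- def _parse_csv(raw: str) -> list:
--     out = []
--     for line in raw.splitlines():
--         if len(out) == 100:
--             break
--         t = _title_of(line)
--         if t is not None and t not in out:
--             out.append(t)
--     return out
-- ===== Notes on version B (the rewrite author's own statement) =====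
-- stated objective: alternative
-- what changed: B factors the per-line filter into a pure Optional-returning helper and builds the answer in one fused pass with no auxiliary dict/set: the output list itself is the dedup index ('t not in out', at most 100 elements) and the 100-cap is an early break, replacing A's inline-append loop followed by a trailing dict.fromkeys dedup and [:100] slice.
import Mathlib
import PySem

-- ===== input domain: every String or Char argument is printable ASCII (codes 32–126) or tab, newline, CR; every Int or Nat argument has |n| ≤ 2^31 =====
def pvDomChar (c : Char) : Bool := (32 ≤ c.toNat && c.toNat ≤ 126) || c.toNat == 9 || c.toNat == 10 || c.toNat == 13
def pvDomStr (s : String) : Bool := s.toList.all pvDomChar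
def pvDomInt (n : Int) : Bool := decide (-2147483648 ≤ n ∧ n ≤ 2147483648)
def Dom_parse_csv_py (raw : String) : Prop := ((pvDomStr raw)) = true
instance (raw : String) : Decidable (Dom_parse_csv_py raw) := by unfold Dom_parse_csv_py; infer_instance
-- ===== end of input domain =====

-- B factors the per-line filter into a pure Optional-returning helper and fuses dedup and
-- the 100-cap into the single pass (output-list membership + early break) instead of A's
-- append loop followed by dict.fromkeys dedup and [:100] slice; same cost class.

-- ===== PORT A =====
def parse_csv_py (raw : String) : List String :=
  let problems := (PySem.Str.splitlines raw).foldl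
    (fun probs line =>
      let line := PySem.Str.strip line
      if PySem.Str.len line = 0 ∨
         (["id", "title", "frequency", "difficulty", "leetcode"].any
            (fun p => PySem.Str.startswith (PySem.Str.lower line) p)) then probs
      else
        let parts := (((PySem.Str.split? line ",").getD []).filter
            (fun p => PySem.Str.strip p ≠ "")).map
            (fun p => PySem.Str.stripChars (PySem.Str.strip p) "\"")
        if parts.length < 2 then probs
        else
          -- parts.length ≥ 2 here, so getD never sees its default (Python indexing is exact)
          let title := if parts.length > 1 then parts.getD 1 "" else parts.getD 0 ""
          if title ≠ "" ∧ PySem.Str.len title > 5 ∧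
             ¬ PySem.Str.strIsdigit (PySem.Str.replace title " " "") then probs ++ [title]
          else probs) []
  PySem.List.slice (PySem.List.dedup problems) none (some 100)

-- ===== PORT B =====
-- B's helper `_title_of`: `some title` iff the line yields a qualifying title
def pvTitleOf (line : String) : Option String :=
  let line := PySem.Str.strip line
  if PySem.Str.len line = 0 ∨
     (["id", "title", "frequency", "difficulty", "leetcode"].any
        (fun p => PySem.Str.startswith (PySem.Str.lower line) p)) then none
  else
    let parts := (((PySem.Str.split? line ",").getD []).filter
        (fun p => PySem.Str.strip p ≠ "")).map
        (fun p => PySem.Str.stripChars (PySem.Str.strip p) "\"")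
    if parts.length < 2 then none
    else
      let t := parts.getD 1 ""
      if PySem.Str.len t > 5 ∧ ¬ PySem.Str.strIsdigit (PySem.Str.replace t " " "") then some t
      else none

-- B's loop with `break`: structural recursion over the lines, output list as dedup index
def pvAltLoop (lines : List String) (out : List String) : List String :=
  match lines with
  | [] => out
  | line :: rest =>
    if out.length = 100 then out
    else
      match pvTitleOf line with
      | some t => if t ∈ out then pvAltLoop rest out else pvAltLoop rest (out ++ [t])
      | none => pvAltLoop rest out

def parse_csv_py_alt (raw : String) : List String :=
  pvAltLoop (PySem.Str.splitlines raw) []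

-- ===== PRECONDITION & SPEC =====
def Spec_parse_csv_py (raw : String) (out : List String) : Prop := out = parse_csv_py_alt raw
instance (raw : String) (out : List String) : Decidable (Spec_parse_csv_py raw out) := by unfold Spec_parse_csv_py; infer_instance

-- ===== CLAIM (what is proved, stated in full; the proofs are below) =====
def Claim_equal_parse_csv_py : Prop := ∀ (raw : String), Dom_parse_csv_py raw → Spec_parse_csv_py raw (parse_csv_py raw)

-- ===== LEMMAS AND PROOFS =====

-- A's loop body equals "append B's helper's result, if any"
theorem pv_stepA_eq (probs : List String) (line : String) :
    (let line := PySem.Str.strip line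
     if PySem.Str.len line = 0 ∨
        (["id", "title", "frequency", "difficulty", "leetcode"].any
           (fun p => PySem.Str.startswith (PySem.Str.lower line) p)) then probs
     else
       let parts := (((PySem.Str.split? line ",").getD []).filter
           (fun p => PySem.Str.strip p ≠ "")).map
           (fun p => PySem.Str.stripChars (PySem.Str.strip p) "\"")
       if parts.length < 2 then probs
       else
         let title := if parts.length > 1 then parts.getD 1 "" else parts.getD 0 ""
         if title ≠ "" ∧ PySem.Str.len title > 5 ∧
            ¬ PySem.Str.strIsdigit (PySem.Str.replace title " " "") then probs ++ [title]
         else probs) =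
    (match pvTitleOf line with
     | some t => probs ++ [t]
     | none => probs) := by
  unfold pvTitleOf
  dsimp only
  by_cases h1 : PySem.Str.len (PySem.Str.strip line) = 0 ∨
      (["id", "title", "frequency", "difficulty", "leetcode"].any fun p =>
          PySem.Str.startswith (PySem.Str.lower (PySem.Str.strip line)) p) = true
  · rw [if_pos h1, if_pos h1]
  · rw [if_neg h1, if_neg h1]
    set parts := List.map (fun p => PySem.Str.stripChars (PySem.Str.strip p) "\"")
      (List.filter (fun p => decide (PySem.Str.strip p ≠ ""))
        ((PySem.Str.split? (PySem.Str.strip line) ",").getD [])) with hparts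
    by_cases h2 : parts.length < 2
    · rw [if_pos h2, if_pos h2]
    · rw [if_neg h2, if_neg h2, if_pos (show parts.length > 1 by omega)]
      set t := parts.getD 1 "" with ht
      by_cases hc : PySem.Str.len t > 5 ∧ ¬PySem.Str.strIsdigit (PySem.Str.replace t " " "") = true
      · have htne : t ≠ "" := by
          intro h; rw [h] at hc; exact absurd hc.1 (by decide)
        rw [if_pos ⟨htne, hc.1, hc.2⟩, if_pos hc]
      · rw [if_neg (fun h => hc ⟨h.2.1, h.2.2⟩), if_neg hc]

theorem pv_ofList_append_singleton (xs : List String) (t : String) :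
    PySem.Set.ofList (xs ++ [t]) = PySem.Set.add (PySem.Set.ofList xs) t := by
  simp [PySem.Set.ofList_eq_foldl, List.foldl_append]

theorem pv_prefix_take {l₁ l₂ : List String} (h : l₁ <+: l₂) {n : Nat}
    (hn : n ≤ l₁.length) : l₁.take n = l₂.take n := by
  obtain ⟨t, rfl⟩ := h
  simp [List.take_append, Nat.sub_eq_zero_of_le hn]

-- A's fold only extends the ordered set of titles
theorem pv_ofList_foldl_prefix (lines : List String) (probs : List String) :
    PySem.Set.ofList probs <+:
      PySem.Set.ofList (lines.foldl
        (fun probs line =>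
          match pvTitleOf line with
          | some t => probs ++ [t]
          | none => probs) probs) := by
  induction lines generalizing probs with
  | nil => exact List.prefix_refl _
  | cons line rest ih =>
    refine List.IsPrefix.trans ?_ (ih _)
    cases h : pvTitleOf line with
    | none => simp [h]
    | some t =>
      simp only [h, pv_ofList_append_singleton, PySem.Set.add]
      split
      · exact List.prefix_refl _
      · exact ⟨[t], rfl⟩

-- main invariant: B's fused loop tracks A's dedup-then-take-100
theorem pv_loop_eq (lines : List String) (probs : List String) :
    pvAltLoop lines ((PySem.Set.ofList probs).take 100) =
      (PySem.Set.ofList (lines.foldl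
        (fun probs line =>
          match pvTitleOf line with
          | some t => probs ++ [t]
          | none => probs) probs)).take 100 := by
  induction lines generalizing probs with
  | nil => rfl
  | cons line rest ih =>
    rw [pvAltLoop]
    by_cases hfull : ((PySem.Set.ofList probs).take 100).length = 100
    · rw [if_pos hfull]
      have h100 : 100 ≤ (PySem.Set.ofList probs).length := by
        simp [List.length_take] at hfull; omega
      exact (pv_prefix_take (pv_ofList_foldl_prefix (line :: rest) probs) h100).symm ▸
        (pv_prefix_take (pv_ofList_foldl_prefix (line :: rest) probs) h100)
    · rw [if_neg hfull]
      have hlt : (PySem.Set.ofList probs).length < 100 := by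
        have := List.length_take_le 100 (PySem.Set.ofList probs)
        simp [List.length_take] at hfull ⊢; omega
      have hself : (PySem.Set.ofList probs).take 100 = PySem.Set.ofList probs :=
        List.take_of_length_le (by omega)
      cases h : pvTitleOf line with
      | none => simp only [h, List.foldl_cons]; exact ih probs
      | some t =>
        simp only [h, List.foldl_cons, hself]
        by_cases hmem : t ∈ PySem.Set.ofList probs
        · rw [if_pos hmem]
          have : PySem.Set.ofList (probs ++ [t]) = PySem.Set.ofList probs := by
            rw [pv_ofList_append_singleton, PySem.Set.add,
                if_pos ((PySem.Set.contains_iff _ _).mpr hmem)]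
          have h2 := ih (probs ++ [t])
          rw [this, hself] at h2
          exact h2
        · rw [if_neg hmem]
          have hadd : PySem.Set.ofList (probs ++ [t]) = PySem.Set.ofList probs ++ [t] := by
            rw [pv_ofList_append_singleton, PySem.Set.add]
            rw [if_neg (fun hc => hmem ((PySem.Set.contains_iff _ _).mp hc))]
          have h2 := ih (probs ++ [t])
          rw [hadd] at h2
          rw [← h2, List.take_of_length_le (by simp; omega)]

-- ===== VERDICT (by name: the statement is the Claim_ definition above) =====
theorem parse_csv_py_spec : Claim_equal_parse_csv_py := by
  intro raw _
  show parse_csv_py raw = parse_csv_py_alt raw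
  simp only [parse_csv_py, parse_csv_py_alt]
  rw [show (some (100 : Int)) = (some ((100 : Nat) : Int)) by norm_num,
      PySem.List.slice_to_natCast]
  have hstep : (fun (probs : List String) line =>
      let line := PySem.Str.strip line
      if PySem.Str.len line = 0 ∨
         (["id", "title", "frequency", "difficulty", "leetcode"].any
            (fun p => PySem.Str.startswith (PySem.Str.lower line) p)) then probs
      else
        let parts := (((PySem.Str.split? line ",").getD []).filter
            (fun p => PySem.Str.strip p ≠ "")).map
            (fun p => PySem.Str.stripChars (PySem.Str.strip p) "\"")
        if parts.length < 2 then probs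
        else
          let title := if parts.length > 1 then parts.getD 1 "" else parts.getD 0 ""
          if title ≠ "" ∧ PySem.Str.len title > 5 ∧
             ¬ PySem.Str.strIsdigit (PySem.Str.replace title " " "") then probs ++ [title]
          else probs) =
      (fun probs line =>
        match pvTitleOf line with
        | some t => probs ++ [t]
        | none => probs) := by
    funext probs line; exact pv_stepA_eq probs line
  rw [hstep]
  have := (pv_loop_eq (PySem.Str.splitlines raw) []).symm
  simpa [PySem.List.dedup_eq_ofList, PySem.Set.ofList] using this
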